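-- pv_equiv track=rewrite | github.com/shevalda/Crossword-Puzzle-Solver | main.py | isRemainingWordLengthUnique
-- ===== SOURCE A (Python) =====
-- def isRemainingWordLengthUnique(word_list):
--     if len(word_list) <= 1:
--         return True
--     else:
--         for word in word_list:
--             if len([w for w in word_list if w != word and len(w) == len(word)]) != 0:
--                 return False
--         return True
-- ===== SOURCE B (Python) =====
-- def isRemainingWordLengthUnique(word_list):
--     # Sort the lengths of the distinct words; any clash shows up as an adjacent pair.
--     # (A counts only pairs of *different* words, so equal duplicates never clash.)
--     lens = sorted(len(w) for w in dict.fromkeys(word_list))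
--     return all(a != b for a, b in zip(lens, lens[1:]))
-- ===== Notes on version B (the rewrite author's own statement) =====
-- stated objective: faster
-- what changed: Replaces A's per-word rescan of the whole list (quadratic nested scan) with one pass: dedupe the words, sort their lengths, and return False iff two adjacent sorted lengths are equal.
import Mathlib
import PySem

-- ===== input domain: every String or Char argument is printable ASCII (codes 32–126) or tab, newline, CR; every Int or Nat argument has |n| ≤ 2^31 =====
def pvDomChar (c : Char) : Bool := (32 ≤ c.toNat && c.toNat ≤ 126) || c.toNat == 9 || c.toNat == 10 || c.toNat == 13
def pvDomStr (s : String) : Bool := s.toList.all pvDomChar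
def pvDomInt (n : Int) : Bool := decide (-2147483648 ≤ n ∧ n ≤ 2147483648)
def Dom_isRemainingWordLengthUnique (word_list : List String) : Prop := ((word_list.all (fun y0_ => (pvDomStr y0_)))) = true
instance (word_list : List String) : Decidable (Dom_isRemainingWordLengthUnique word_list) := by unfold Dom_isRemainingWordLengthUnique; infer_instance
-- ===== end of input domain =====

-- B sorts the lengths of the distinct words and scans adjacent pairs (one sorted pass)
-- instead of A's per-word rescan of the whole list; objective: faster (O(n log n) vs O(n^2) comparisons).


-- ===== PORT A =====
-- 'for word in word_list: if len([w for w in word_list if w != word and len(w) == len(word)]) != 0: return False' / 'return True'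
def pvLoopA (wl : List String) : List String → Bool
  | [] => true
  | word :: rest =>
    if (wl.filter (fun w => w != word && PySem.Str.len w == PySem.Str.len word)).length ≠ 0
    then false
    else pvLoopA wl rest

def isRemainingWordLengthUnique (word_list : List String) : Bool :=
  if word_list.length ≤ 1 then true
  else pvLoopA word_list word_list

-- ===== PORT B =====
-- lens = sorted(len(w) for w in dict.fromkeys(word_list)); all(a != b for a, b in zip(lens, lens[1:]))
def isRemainingWordLengthUnique_alt (word_list : List String) : Bool :=
  let lens := PySem.List.sorted ((PySem.List.dedup word_list).map PySem.Str.len) (fun x => x) false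
  (lens.zip (lens.drop 1)).all (fun p => p.1 != p.2)

-- ===== PRECONDITION & SPEC =====
def Spec_isRemainingWordLengthUnique (word_list : List String) (out : Bool) : Prop := out = isRemainingWordLengthUnique_alt word_list
instance (word_list : List String) (out : Bool) : Decidable (Spec_isRemainingWordLengthUnique word_list out) := by unfold Spec_isRemainingWordLengthUnique; infer_instance

-- ===== CLAIM (what is proved, stated in full; the proofs are below) =====
def Claim_equal_isRemainingWordLengthUnique : Prop := ∀ (word_list : List String), Dom_isRemainingWordLengthUnique word_list → Spec_isRemainingWordLengthUnique word_list (isRemainingWordLengthUnique word_list)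

-- ===== LEMMAS AND PROOFS =====
-- the shared characterisation: some two DIFFERENT words of the list have equal lengths
def pvClash (wl : List String) : Prop :=
  ∃ u ∈ wl, ∃ v ∈ wl, u ≠ v ∧ PySem.Str.len u = PySem.Str.len v

lemma pvLoopA_false_iff (wl l : List String) :
    pvLoopA wl l = false ↔ ∃ w ∈ l, ∃ x ∈ wl, x ≠ w ∧ PySem.Str.len x = PySem.Str.len w := by
  induction l with
  | nil => simp [pvLoopA]
  | cons word rest ih =>
    by_cases h : (wl.filter (fun w => w != word && PySem.Str.len w == PySem.Str.len word)).length ≠ 0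
    · have hx : ∃ x ∈ wl, x ≠ word ∧ PySem.Str.len x = PySem.Str.len word := by
        rcases List.length_pos_iff_exists_mem.mp (Nat.pos_of_ne_zero h) with ⟨x, hx⟩
        rcases List.mem_filter.mp hx with ⟨hmem, hp⟩
        simp only [Bool.and_eq_true, bne_iff_ne, beq_iff_eq] at hp
        exact ⟨x, hmem, hp.1, hp.2⟩
      simp only [pvLoopA, if_pos h]
      constructor
      · intro _
        rcases hx with ⟨x, hxm, hne, hlen⟩
        exact ⟨word, List.mem_cons_self, x, hxm, hne, hlen⟩
      · intro _; trivial
    · simp only [pvLoopA, if_neg h, ih]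
      have hno : ¬ ∃ x ∈ wl, x ≠ word ∧ PySem.Str.len x = PySem.Str.len word := by
        intro ⟨x, hxm, hne, hlen⟩
        apply h
        have : x ∈ wl.filter (fun w => w != word && PySem.Str.len w == PySem.Str.len word) := by
          refine List.mem_filter.mpr ⟨hxm, ?_⟩
          simp only [Bool.and_eq_true, bne_iff_ne, beq_iff_eq]
          exact ⟨hne, hlen⟩
        have := List.length_pos_iff_exists_mem.mpr ⟨x, this⟩
        omega
      constructor
      · rintro ⟨w, hw, hrest⟩
        exact ⟨w, List.mem_cons_of_mem _ hw, hrest⟩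
      · rintro ⟨w, hw, hrest⟩
        rcases List.mem_cons.mp hw with rfl | hw'
        · exact absurd hrest hno
        · exact ⟨w, hw', hrest⟩

lemma pvA_false_iff (wl : List String) :
    isRemainingWordLengthUnique wl = false ↔ pvClash wl := by
  unfold isRemainingWordLengthUnique
  by_cases h : wl.length ≤ 1
  · simp only [if_pos h]
    constructor
    · intro hf; cases hf
    · rintro ⟨u, hu, v, hv, hne, _⟩
      exfalso; apply hne
      match wl, h with
      | [], _ => cases hu
      | [a], _ => rw [List.mem_singleton.mp hu, List.mem_singleton.mp hv]
  · simp only [if_neg h, pvLoopA_false_iff]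
    constructor
    · rintro ⟨w, hw, x, hx, hne, hlen⟩
      exact ⟨x, hx, w, hw, hne, hlen⟩
    · rintro ⟨u, hu, v, hv, hne, hlen⟩
      exact ⟨v, hv, u, hu, hne, hlen⟩

lemma pvAllZip_iff : ∀ (l : List Int),
    ((l.zip (l.drop 1)).all (fun p => p.1 != p.2) = true) ↔ l.IsChain (· ≠ ·)
  | [] => by simp
  | [a] => by simp
  | a :: b :: t => by
    rw [show ((a::b::t).zip ((a::b::t).drop 1)) = (a, b) :: ((b::t).zip ((b::t).drop 1)) from rfl,
      List.isChain_cons_cons, ← pvAllZip_iff (b :: t)]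
    simp

lemma pvChain_lt_of_le_ne : ∀ (l : List Int),
    l.IsChain (· ≤ ·) → l.IsChain (· ≠ ·) → l.IsChain (· < ·)
  | [] , _, _ => by simp
  | [a], _, _ => by simp
  | a :: b :: t, h1, h2 => by
    rw [List.isChain_cons_cons] at h1 h2 ⊢
    exact ⟨lt_of_le_of_ne h1.1 h2.1, pvChain_lt_of_le_ne (b :: t) h1.2 h2.2⟩

lemma pvAlt_true_iff_nodup (wl : List String) :
    isRemainingWordLengthUnique_alt wl = true ↔ ((PySem.List.dedup wl).map PySem.Str.len).Nodup := by
  unfold isRemainingWordLengthUnique_alt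
  set lens := PySem.List.sorted ((PySem.List.dedup wl).map PySem.Str.len) (fun x => x) false with hlens
  have hperm : lens.Perm ((PySem.List.dedup wl).map PySem.Str.len) := PySem.List.sorted_perm _ _ _
  have hle : lens.Pairwise (· ≤ ·) := by
    have := PySem.List.sorted_pairwise ((PySem.List.dedup wl).map PySem.Str.len) (fun x => x)
    simpa using this
  rw [pvAllZip_iff, ← hperm.nodup_iff]
  constructor
  · intro hch
    have hlt : lens.IsChain (· < ·) := pvChain_lt_of_le_ne lens hle.isChain hch
    exact (hlt.pairwise).imp ne_of_lt
  · intro hnd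
    exact (hnd.isChain : lens.IsChain (· ≠ ·))

lemma pvAlt_false_iff (wl : List String) :
    isRemainingWordLengthUnique_alt wl = false ↔ pvClash wl := by
  rw [← Bool.not_eq_true, pvAlt_true_iff_nodup,
    List.nodup_map_iff_inj_on (PySem.List.nodup_dedup wl)]
  unfold pvClash
  constructor
  · intro h
    by_contra hno
    apply h
    intro x hx y hy hxy
    by_contra hne
    exact hno ⟨x, (PySem.List.mem_dedup _ _).mp hx, y, (PySem.List.mem_dedup _ _).mp hy, hne, hxy⟩
  · rintro ⟨u, hu, v, hv, hne, hlen⟩ h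
    exact hne (h u ((PySem.List.mem_dedup _ _).mpr hu) v ((PySem.List.mem_dedup _ _).mpr hv) hlen)

-- ===== VERDICT (by name: the statement is the Claim_ definition above) =====
theorem isRemainingWordLengthUnique_spec : Claim_equal_isRemainingWordLengthUnique := by
  intro wl _
  unfold Spec_isRemainingWordLengthUnique
  have h := (pvA_false_iff wl).trans (pvAlt_false_iff wl).symm
  cases hA : isRemainingWordLengthUnique wl <;> cases hB : isRemainingWordLengthUnique_alt wl <;>
    simp_all
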